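-- pv_equiv track=rewrite | github.com/pypi-data/pypi-mirror-19 | packages/maputil/maputil-0.1.0.tar.gz/maputil-0.1.0/src/maputil/tools.py | getkey_unique
-- ===== SOURCE A (Python) =====
-- _default = object()
--
-- def getkey_unique(map, value, default=_default):
--     """
--     Similar to getkey(), but raises a ValueError if the key is not unique
--
--     Example:
--         >>> getkey_unique({1: 'one', 2: 'two'}, 'one')
--         1
--         >>> getkey_unique({3.14: 'pi', 2: 'two', 3.1415: 'pi'}, 'pi')
--         Traceback (most recent call last):
--         ...
--         ValueError: repeated keys: 3.1415, 3.14
--     """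
--
--     out = _default
--     items = iter(map.items())
--
--     # Find the associated key
--     for k, v in items:
--         if v == value:
--             out = k
--             break
--     else:
--         if default is _default:
--             raise KeyError('no keys points to %r' % value)
--         else:
--             return default
--
--     # Checks if the key is unique
--     for k, v in items:
--         if v == value:
--             raise ValueError('repeated keys: %r, %r' % (out, k))
--     return out
-- ===== SOURCE B (Python) =====
-- _default = object()
--
-- def getkey_unique(map, value, default=_default):
--     hits = [k for k, v in map.items() if v == value]
--     if not hits:
--         if default is _default:
--             raise KeyError('no keys points to %r' % value)
--         return default
--     if len(hits) >= 2:
--         raise ValueError('repeated keys: %r, %r' % (hits[0], hits[1]))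
--     return hits[0]
-- ===== Notes on version B (the rewrite author's own statement) =====
-- stated objective: simpler
-- what changed: Replaces A's break-and-resume shared-iterator two-loop structure with a single collect-all comprehension followed by a count-based case split.
import Mathlib
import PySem

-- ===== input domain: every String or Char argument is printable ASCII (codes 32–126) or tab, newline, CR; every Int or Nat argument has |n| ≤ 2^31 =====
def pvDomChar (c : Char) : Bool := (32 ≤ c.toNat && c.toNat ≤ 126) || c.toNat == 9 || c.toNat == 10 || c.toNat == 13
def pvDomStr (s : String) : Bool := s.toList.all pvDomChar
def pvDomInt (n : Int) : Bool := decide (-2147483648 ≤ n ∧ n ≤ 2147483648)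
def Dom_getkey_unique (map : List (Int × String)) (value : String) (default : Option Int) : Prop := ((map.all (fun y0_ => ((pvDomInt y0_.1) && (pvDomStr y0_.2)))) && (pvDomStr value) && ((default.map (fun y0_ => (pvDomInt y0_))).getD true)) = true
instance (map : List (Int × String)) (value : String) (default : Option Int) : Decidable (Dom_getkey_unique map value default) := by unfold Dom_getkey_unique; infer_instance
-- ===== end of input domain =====

-- B replaces A's break-and-resume shared-iterator two-loop structure with one collect-then-count pass (objective: simpler).


-- ===== PORT A =====
-- first loop of A: scan for the first pair whose value matches; return its key and the REST of the iterator
def guFind (value : String) : List (Int × String) → Option (Int × List (Int × String))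
  | [] => none
  | (k, v) :: rest => if v == value then some (k, rest) else guFind value rest

-- second loop of A: resume on the leftover iterator; a second match raises ValueError (excluded by Pre_, 0 here)
def guCheck (value : String) (out : Int) : List (Int × String) → Int
  | [] => out
  | (_, v) :: rest => if v == value then 0 else guCheck value out rest

def getkey_unique (map : List (Int × String)) (value : String) (default : Option Int) : Int :=
  match guFind value map with
  | none =>
    match default with
    | none => 0           -- A raises KeyError here; excluded by Pre_
    | some d => d
  | some (out, rest) => guCheck value out rest

-- ===== PORT B =====
def getkey_unique_alt (map : List (Int × String)) (value : String) (default : Option Int) : Int :=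
  let hits := (map.filter (fun p => p.2 == value)).map Prod.fst
  match hits with
  | [] =>
    match default with
    | none => 0           -- B raises KeyError here; excluded by Pre_
    | some d => d
  | [k] => k
  | _ :: _ :: _ => 0      -- B raises ValueError here; excluded by Pre_

-- ===== PRECONDITION & SPEC =====
-- Pre_ excludes exactly the inputs where A raises: KeyError (no matching value and no default given)
-- and ValueError (two or more matching values).
def Pre_getkey_unique (map : List (Int × String)) (value : String) (default : Option Int) : Prop :=
  (map.filter (fun p => p.2 == value)).length ≤ 1 ∧
  ((map.filter (fun p => p.2 == value)).length = 1 ∨ default ≠ none)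
instance (map : List (Int × String)) (value : String) (default : Option Int) : Decidable (Pre_getkey_unique map value default) := by unfold Pre_getkey_unique; infer_instance

def pvWitness_getkey_unique : (List (Int × String)) × String × Option Int := ([(1, "one"), (2, "two")], "one", none)

def Spec_getkey_unique (map : List (Int × String)) (value : String) (default : Option Int) (out : Int) : Prop := out = getkey_unique_alt map value default
instance (map : List (Int × String)) (value : String) (default : Option Int) (out : Int) : Decidable (Spec_getkey_unique map value default out) := by unfold Spec_getkey_unique; infer_instance

-- ===== CLAIM (what is proved, stated in full; the proofs are below) =====
def Claim_equal_getkey_unique : Prop := ∀ (map : List (Int × String)) (value : String) (default : Option Int), Dom_getkey_unique map value default → Pre_getkey_unique map value default → Spec_getkey_unique map value default (getkey_unique map value default)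

-- ===== LEMMAS AND PROOFS =====

-- guFind finds nothing iff the filter is empty
theorem guFind_none_iff (value : String) (map : List (Int × String)) :
    guFind value map = none ↔ map.filter (fun p => p.2 == value) = [] := by
  induction map with
  | nil => simp [guFind]
  | cons h t ih =>
    obtain ⟨k, v⟩ := h
    by_cases hv : v == value <;> simp [guFind, hv, ih]

-- when guFind succeeds, the filter splits as that match followed by the leftover's filter
theorem guFind_some (value : String) (map : List (Int × String)) (k : Int) (rest : List (Int × String)) :
    guFind value map = some (k, rest) →
    map.filter (fun p => p.2 == value) = (k, value) :: rest.filter (fun p => p.2 == value) := by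
  induction map with
  | nil => simp [guFind]
  | cons h t ih =>
    obtain ⟨k', v⟩ := h
    by_cases hv : v == value
    · simp [guFind, hv]
      rintro rfl rfl
      simp [beq_iff_eq] at hv
      simp [hv]
    · simp [guFind, hv]
      exact ih

-- if the leftover has no match, the second loop just returns out
theorem guCheck_no_match (value : String) (out : Int) (rest : List (Int × String)) :
    rest.filter (fun p => p.2 == value) = [] → guCheck value out rest = out := by
  induction rest with
  | nil => simp [guCheck]
  | cons h t ih =>
    obtain ⟨k, v⟩ := h
    intro hf
    by_cases hv : v == value
    · rw [List.filter_cons_of_pos (by simpa using hv)] at hf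
      exact absurd hf (by simp)
    · rw [List.filter_cons_of_neg (by simpa using hv)] at hf
      simp [guCheck, hv, ih hf]

-- ===== VERDICT (by name: the statement is the Claim_ definition above) =====
theorem getkey_unique_spec : Claim_equal_getkey_unique := by
  intro map value default _ hpre
  obtain ⟨hle, _⟩ := hpre
  unfold Spec_getkey_unique getkey_unique getkey_unique_alt
  cases hfind : guFind value map with
  | none =>
    rw [guFind_none_iff] at hfind
    simp [hfind]
  | some p =>
    obtain ⟨k, rest⟩ := p
    have hsplit := guFind_some value map k rest hfind
    have hlen : (rest.filter (fun p => p.2 == value)).length = 0 := by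
      rw [hsplit, List.length_cons] at hle; omega
    have hrest : rest.filter (fun p => p.2 == value) = [] := List.length_eq_zero_iff.mp hlen
    simp [hsplit, hrest, guCheck_no_match value k rest hrest]
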